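-- pv_equiv track=rewrite | github.com/isbushcar/python-project-lvl2 | gendiff.py | mark_keys
-- ===== SOURCE A (Python) =====
-- from functools import partial
--
-- def mark_keys(items_one, items_two):
--     """Return sorted list with tuple (key, mark)."""
--     get_status = partial(get_key_status, items_one, items_two)
--     marked_keys = []
--     keys = set(items_one.keys()).union(set(items_two.keys()))
--     for key in keys:
--         marked_keys.append((key, get_status(key)))
--     marked_keys.sort(key=lambda marked_key: marked_key[0])
--     return marked_keys
--
-- def get_key_status(items_one, items_two, key):
--     """Return key status ((added/deleted/changed/unchanged)."""
--     keys_one = set(items_one.keys())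
--     keys_two = set(items_two.keys())
--     if key in keys_two.difference(keys_one):
--         return 'added'
--     if key in keys_one.difference(keys_two):
--         return 'deleted'
--     is_unchanged = items_one.get(key) == items_two.get(key) or (
--         isinstance(items_one.get(key), dict) and (
--             isinstance(items_two.get(key), dict)
--         ))
--     if is_unchanged:
--         return 'unchanged'
--     return 'changed'
-- ===== SOURCE B (Python) =====
-- def mark_keys(items_one, items_two):
--     """Return sorted list with tuple (key, mark)."""
--     keys_one = set(items_one.keys())
--     keys_two = set(items_two.keys())
--     added = [(key, 'added') for key in keys_two - keys_one]
--     deleted = [(key, 'deleted') for key in keys_one - keys_two]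
--     common = [
--         (key, 'unchanged' if items_one[key] == items_two[key] or (
--             isinstance(items_one[key], dict) and isinstance(items_two[key], dict)
--         ) else 'changed')
--         for key in keys_one & keys_two
--     ]
--     return sorted(added + deleted + common, key=lambda pair: pair[0])
-- ===== Notes on version B (the rewrite author's own statement) =====
-- stated objective: faster
-- what changed: Replaces A's per-key status helper (which rebuilds both key sets and their differences for every key of the union) with a single three-way partition into added/deleted/common groups, mapping each group to its status and sorting the merged list once.
import Mathlib
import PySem

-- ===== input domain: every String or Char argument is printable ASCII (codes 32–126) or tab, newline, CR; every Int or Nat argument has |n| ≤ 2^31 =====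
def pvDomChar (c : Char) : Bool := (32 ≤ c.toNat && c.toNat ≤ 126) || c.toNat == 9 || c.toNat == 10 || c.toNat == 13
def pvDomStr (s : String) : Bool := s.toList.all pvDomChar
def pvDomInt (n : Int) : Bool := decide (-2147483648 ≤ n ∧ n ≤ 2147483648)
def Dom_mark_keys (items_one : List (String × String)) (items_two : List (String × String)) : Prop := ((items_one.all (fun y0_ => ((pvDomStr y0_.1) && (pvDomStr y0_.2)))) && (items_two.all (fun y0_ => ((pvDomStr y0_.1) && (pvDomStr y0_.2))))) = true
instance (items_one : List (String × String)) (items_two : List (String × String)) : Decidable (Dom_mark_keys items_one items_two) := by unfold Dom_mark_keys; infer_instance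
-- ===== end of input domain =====

-- B partitions the key union into added/deleted/common groups and sorts the merged list once,
-- instead of A's per-key status helper that recomputes the key-set differences for every key.

-- ===== PORT A =====
-- The dicts carry String values here, so the `isinstance(..., dict)` clause of A's
-- `is_unchanged` test is statically False and the test is exactly value equality.
def get_key_status (items_one : List (String × String)) (items_two : List (String × String)) (key : String) : String :=
  let keys_one : PySem.Set String := PySem.Set.ofList (PySem.Dict.keys (PySem.Dict.mk items_one))
  let keys_two : PySem.Set String := PySem.Set.ofList (PySem.Dict.keys (PySem.Dict.mk items_two))
  if PySem.Set.contains (PySem.Set.diff keys_two keys_one) key then "added"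
  else if PySem.Set.contains (PySem.Set.diff keys_one keys_two) key then "deleted"
  else if (PySem.Dict.get? (PySem.Dict.mk items_one) key == PySem.Dict.get? (PySem.Dict.mk items_two) key) then "unchanged"
  else "changed"

def mark_keys (items_one : List (String × String)) (items_two : List (String × String)) : List (String × String) :=
  let keys : PySem.Set String :=
    PySem.Set.union (PySem.Set.ofList (PySem.Dict.keys (PySem.Dict.mk items_one)))
      (PySem.Set.ofList (PySem.Dict.keys (PySem.Dict.mk items_two)))
  let marked_keys := keys.foldl (fun acc key => acc ++ [(key, get_key_status items_one items_two key)]) []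
  PySem.List.sorted marked_keys (fun marked_key => marked_key.1) false

-- ===== PORT B =====
def mark_keys_alt (items_one : List (String × String)) (items_two : List (String × String)) : List (String × String) :=
  let keys_one : PySem.Set String := PySem.Set.ofList (PySem.Dict.keys (PySem.Dict.mk items_one))
  let keys_two : PySem.Set String := PySem.Set.ofList (PySem.Dict.keys (PySem.Dict.mk items_two))
  let added := (PySem.Set.diff keys_two keys_one).map (fun key => (key, "added"))
  let deleted := (PySem.Set.diff keys_one keys_two).map (fun key => (key, "deleted"))
  let common := (PySem.Set.inter keys_one keys_two).map (fun key =>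
    (key, if PySem.Dict.get? (PySem.Dict.mk items_one) key == PySem.Dict.get? (PySem.Dict.mk items_two) key
          then "unchanged" else "changed"))
  PySem.List.sorted (added ++ deleted ++ common) (fun pair => pair.1) false

-- ===== PRECONDITION & SPEC =====
def Spec_mark_keys (items_one : List (String × String)) (items_two : List (String × String)) (out : List (String × String)) : Prop := out = mark_keys_alt items_one items_two
instance (items_one : List (String × String)) (items_two : List (String × String)) (out : List (String × String)) : Decidable (Spec_mark_keys items_one items_two out) := by unfold Spec_mark_keys; infer_instance

-- ===== CLAIM (what is proved, stated in full; the proofs are below) =====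
def Claim_equal_mark_keys : Prop := ∀ (items_one : List (String × String)) (items_two : List (String × String)), Dom_mark_keys items_one items_two → Spec_mark_keys items_one items_two (mark_keys items_one items_two)

-- ===== LEMMAS AND PROOFS =====

-- status of each key group, read off from A's helper
theorem status_added (i1 i2 : List (String × String)) (k : String)
    (h : k ∈ PySem.Set.diff (PySem.Set.ofList (PySem.Dict.keys (PySem.Dict.mk i2)))
      (PySem.Set.ofList (PySem.Dict.keys (PySem.Dict.mk i1)))) :
    get_key_status i1 i2 k = "added" := by
  unfold get_key_status
  rw [if_pos (by rw [PySem.Set.contains_iff]; exact h)]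

theorem status_deleted (i1 i2 : List (String × String)) (k : String)
    (h : k ∈ PySem.Set.diff (PySem.Set.ofList (PySem.Dict.keys (PySem.Dict.mk i1)))
      (PySem.Set.ofList (PySem.Dict.keys (PySem.Dict.mk i2)))) :
    get_key_status i1 i2 k = "deleted" := by
  have h' := h; rw [PySem.Set.mem_diff] at h'
  unfold get_key_status
  rw [if_neg (by rw [PySem.Set.contains_iff, PySem.Set.mem_diff]; exact fun hc => hc.2 h'.1),
    if_pos (by rw [PySem.Set.contains_iff]; exact h)]

theorem status_common (i1 i2 : List (String × String)) (k : String)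
    (h : k ∈ PySem.Set.inter (PySem.Set.ofList (PySem.Dict.keys (PySem.Dict.mk i1)))
      (PySem.Set.ofList (PySem.Dict.keys (PySem.Dict.mk i2)))) :
    get_key_status i1 i2 k =
      (if PySem.Dict.get? (PySem.Dict.mk i1) k == PySem.Dict.get? (PySem.Dict.mk i2) k
       then "unchanged" else "changed") := by
  have h' := h; rw [PySem.Set.mem_inter] at h'
  unfold get_key_status
  rw [if_neg (by rw [PySem.Set.contains_iff, PySem.Set.mem_diff]; exact fun hc => hc.2 h'.1),
    if_neg (by rw [PySem.Set.contains_iff, PySem.Set.mem_diff]; exact fun hc => hc.2 h'.2)]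

-- ===== VERDICT (by name: the statement is the Claim_ definition above) =====
theorem mark_keys_spec : Claim_equal_mark_keys := by
  intro i1 i2 _
  unfold Spec_mark_keys mark_keys mark_keys_alt
  dsimp only
  set k1 : PySem.Set String := PySem.Set.ofList (PySem.Dict.keys (PySem.Dict.mk i1)) with hk1
  set k2 : PySem.Set String := PySem.Set.ofList (PySem.Dict.keys (PySem.Dict.mk i2)) with hk2
  set g : String → String × String := fun k => (k, get_key_status i1 i2 k) with hg
  -- A's loop is a map over the union set
  have hfold : (PySem.Set.union k1 k2).foldl
      (fun acc key => acc ++ [(key, get_key_status i1 i2 key)]) [] = (PySem.Set.union k1 k2).map g := by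
    simpa using PySem.List.foldl_append_singleton_eq_map g (PySem.Set.union k1 k2) []
  -- B's groups are the same map over the partition, which is a permutation of the union
  have hn1 : k1.Nodup := PySem.Set.nodup_ofList _
  have hn2 : k2.Nodup := PySem.Set.nodup_ofList _
  have hnu : (PySem.Set.union k1 k2).Nodup := PySem.Set.nodup_union k1 k2 hn1
  have hBgroups :
      (PySem.Set.diff k2 k1).map (fun key => (key, "added")) ++
        (PySem.Set.diff k1 k2).map (fun key => (key, "deleted")) ++
        (PySem.Set.inter k1 k2).map (fun key =>
          (key, if PySem.Dict.get? (PySem.Dict.mk i1) key == PySem.Dict.get? (PySem.Dict.mk i2) key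
                then "unchanged" else "changed"))
      = (PySem.Set.diff k2 k1 ++ PySem.Set.diff k1 k2 ++ PySem.Set.inter k1 k2).map g := by
    rw [List.map_append, List.map_append]
    refine congrArg₂ _ (congrArg₂ _ ?_ ?_) ?_
    · exact List.map_eq_map_iff.mpr fun a ha => by
        simp only [hg]; rw [status_added i1 i2 a ha]
    · exact List.map_eq_map_iff.mpr fun a ha => by
        simp only [hg]; rw [status_deleted i1 i2 a ha]
    · exact List.map_eq_map_iff.mpr fun a ha => by
        simp only [hg]; rw [status_common i1 i2 a ha]
  have hndP : (PySem.Set.diff k2 k1 ++ PySem.Set.diff k1 k2 ++ PySem.Set.inter k1 k2).Nodup := by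
    refine List.Nodup.append (List.Nodup.append ?_ ?_ ?_) ?_ ?_
    · exact PySem.Set.nodup_diff k2 k1 hn2
    · exact PySem.Set.nodup_diff k1 k2 hn1
    · intro a ha hb
      rw [PySem.Set.mem_diff] at ha hb
      exact ha.2 hb.1
    · exact PySem.Set.nodup_inter k1 k2 hn1
    · intro a ha hb
      rw [List.mem_append, PySem.Set.mem_diff, PySem.Set.mem_diff] at ha
      rw [PySem.Set.mem_inter] at hb
      rcases ha with h | h
      · exact h.2 hb.1
      · exact h.2 hb.2
  have hpermP : (PySem.Set.diff k2 k1 ++ PySem.Set.diff k1 k2 ++ PySem.Set.inter k1 k2).Perm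
      (PySem.Set.union k1 k2) := by
    refine (List.perm_ext_iff_of_nodup hndP hnu).mpr fun a => ?_
    simp only [List.mem_append, PySem.Set.mem_diff, PySem.Set.mem_inter, PySem.Set.mem_union]
    tauto
  -- the common sorted value: the union's keys in increasing order, statuses attached
  set S : List String := PySem.List.sorted (PySem.Set.union k1 k2) (fun x => x) false with hS
  have hSperm : S.Perm (PySem.Set.union k1 k2) := PySem.List.sorted_perm _ _ _
  have hSlt : S.Pairwise (· < ·) := by
    have hle : S.Pairwise (fun a b => a ≤ b) := PySem.List.sorted_pairwise _ _
    have hnd : S.Pairwise (· ≠ ·) := (hSperm.nodup_iff.mpr hnu)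
    exact (hle.and hnd).imp fun h => lt_of_le_of_ne h.1 h.2
  have hSmaplt : (S.map g).Pairwise (fun a b => a.1 < b.1) := by
    refine List.Pairwise.map g (fun a b hab => ?_) hSlt
    simpa only [hg] using hab
  rw [hfold, hBgroups,
    PySem.List.sorted_eq_of_perm_of_pairwise_lt ((PySem.Set.union k1 k2).map g) (S.map g)
      (fun p => p.1) (hSperm.map g) hSmaplt,
    PySem.List.sorted_eq_of_perm_of_pairwise_lt
      ((PySem.Set.diff k2 k1 ++ PySem.Set.diff k1 k2 ++ PySem.Set.inter k1 k2).map g) (S.map g)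
      (fun p => p.1) (((hSperm.map g).trans (hpermP.map g).symm)) hSmaplt]
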